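-- pv_equiv track=rewrite | github.com/gael-mehdi/Optimisation-surveillance-problem | mainopt.py | place_guards
-- ===== SOURCE A (Python) =====
-- def count_visible_targets(grid, x, y):
--     rows = len(grid)
--     columns = len(grid[0])
--     count = 0
--
--     # Vérifier les cibles visibles vers la droite
--     for i in range(y, columns):
--         if grid[x][i] == 'CIBLE':
--             count += 1
--         if grid[x][i] == 'OBSTACLE':
--             break
--
--     # Vérifier les cibles visibles vers la gauche
--     for i in range(y, -1, -1):
--         if grid[x][i] == 'CIBLE':
--             count += 1
--         if grid[x][i] == 'OBSTACLE':
--             break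
--
--     # Vérifier les cibles visibles vers le bas
--     for i in range(x, rows):
--         if grid[i][y] == 'CIBLE':
--             count += 1
--         if grid[i][y] == 'OBSTACLE':
--             break
--
--     # Vérifier les cibles visibles vers le haut
--     for i in range(x, -1, -1):
--         if grid[i][y] == 'CIBLE':
--             count += 1
--         if grid[i][y] == 'OBSTACLE':
--             break
--
--     return count
--
-- def place_guards(grid):
--     guards = []
--     rows = len(grid)
--     columns = len(grid[0])
--     targets = []
--
--     # Calcul de la visibilité de chaque cible depuis chaque position de gardien possible
--     for x in range(rows):
--         for y in range(columns):
--             if grid[x][y] == 'CIBLE':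
--                 visibility = count_visible_targets(grid, x, y)
--                 targets.append((x, y, visibility))
--
--     # Tri des positions de gardien en fonction de leur visibilité décroissante
--     targets.sort(key=lambda t: t[2], reverse=True)
--
--     # Sélection des gardiens en fonction de leur visibilité
--     for target in targets:
--         x, y, _ = target
--         if not any(guard[0] == x or guard[1] == y for guard in guards):
--             guards.append((x, y))
--             # Marquage des cibles visibles depuis cette position comme couvertes
--             for i in range(y, columns):
--                 if grid[x][i] == 'CIBLE':
--                     grid[x][i] = False
--                 if grid[x][i] == 'OBSTACLE':
--                     break
--             for i in range(y, -1, -1):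
--                 if grid[x][i] == 'CIBLE':
--                     grid[x][i] = False
--                 if grid[x][i] == 'OBSTACLE':
--                     break
--             for i in range(x, rows):
--                 if grid[i][y] == 'CIBLE':
--                     grid[i][y] = False
--                 if grid[i][y] == 'OBSTACLE':
--                     break
--             for i in range(x, -1, -1):
--                 if grid[i][y] == 'CIBLE':
--                     grid[i][y] = False
--                 if grid[i][y] == 'OBSTACLE':
--                     break
--
--     return guards
-- ===== SOURCE B (Python) =====
-- def _sweep(cells):
--     # running count of CIBLE cells in the obstacle-free run ending at each cell
--     out = []
--     acc = 0
--     for c in cells: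
--         acc = 0 if c == 'OBSTACLE' else acc + (1 if c == 'CIBLE' else 0)
--         out.append(acc)
--     return out
--
-- def place_guards(grid):
--     rows = len(grid)
--     columns = len(grid[0])
--     # one sweep per direction gives each cell's directional run count
--     # (cells beyond row 0's width are never looked at, so trim the rows to it)
--     trimmed = [row[:columns] for row in grid]
--     left = [_sweep(row) for row in trimmed]                   # left[x][y]: run count towards the left, incl. self
--     right = [_sweep(row[::-1])[::-1] for row in trimmed]      # towards the right, incl. self
--     cols = [[row[y] for row in grid] for y in range(columns)]
--     up = [_sweep(col) for col in cols]                        # up[y][x]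
--     down = [_sweep(col[::-1])[::-1] for col in cols]          # down[y][x]
--     # counting sort: bucket targets by visibility (row-major order kept inside a bucket)
--     maxvis = rows + columns + 2
--     buckets = {}
--     for x in range(rows):
--         for y in range(columns):
--             if grid[x][y] == 'CIBLE':
--                 vis = left[x][y] + right[x][y] + up[y][x] + down[y][x]
--                 buckets.setdefault(vis, []).append((x, y))
--     # greedy selection with hash-set row/column membership tests
--     guards = []
--     used_rows = set()
--     used_cols = set()
--     for v in range(maxvis, -1, -1):
--         for (x, y) in buckets.get(v, []):
--             if x not in used_rows and y not in used_cols: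
--                 guards.append((x, y))
--                 used_rows.add(x)
--                 used_cols.add(y)
--     return guards
-- ===== Notes on version B (the rewrite author's own statement) =====
-- stated objective: alternative
-- what changed: Per-cell visibility is read off four precomputed directional sweep arrays instead of being recomputed by four scans per target, the stable descending sort is replaced by a counting-sort into visibility buckets, and the greedy pass tests row/column hash sets instead of scanning the guard list; B also does not mutate the input grid (A's in-place marking never affects the returned value).
-- outside the precondition, e.g. on place_guards([]): A raises IndexError, B raises IndexError
import Mathlib
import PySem

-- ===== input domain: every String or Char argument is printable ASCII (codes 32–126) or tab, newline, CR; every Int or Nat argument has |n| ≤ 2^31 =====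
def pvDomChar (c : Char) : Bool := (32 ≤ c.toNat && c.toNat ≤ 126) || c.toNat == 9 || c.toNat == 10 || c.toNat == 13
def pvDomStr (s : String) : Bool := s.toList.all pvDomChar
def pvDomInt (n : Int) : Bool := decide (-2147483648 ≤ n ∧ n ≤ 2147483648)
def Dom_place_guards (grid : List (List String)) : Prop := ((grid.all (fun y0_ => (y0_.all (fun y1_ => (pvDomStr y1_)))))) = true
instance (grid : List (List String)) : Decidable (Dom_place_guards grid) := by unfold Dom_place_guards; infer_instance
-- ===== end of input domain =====

-- ===== PORT A =====
-- A mutates its argument in place (marks covered cells); the equivalence claimed here is about the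
-- RETURN value only.  'grid[x][i] = False' is ported as storing the marker "False": the only reads
-- of a written cell compare it to 'CIBLE' / 'OBSTACLE', on which the bool False and the marker agree.
-- The repeated 'for … if CIBLE … if OBSTACLE: break' loop of count_visible_targets is factored into
-- the helper pvBreakCount (count with early exit, encoded as a foldl over the index list with a done flag).
def pvBreakCount (idxs : List Int) (get : Int → String) : Int :=
  (idxs.foldl (fun (s : Int × Bool) i =>
      if s.2 then s
      else
        let c := if get i = "CIBLE" then s.1 + 1 else s.1
        if get i = "OBSTACLE" then (c, true) else (c, false))
    (0, false)).1

def count_visible_targets (grid : List (List String)) (x y : Int) : Int :=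
  let rows : Int := PySem.List.len grid
  let columns : Int := PySem.List.len (PySem.List.pyGetD grid 0 [])
  let count : Int := 0
  let count := count + pvBreakCount (PySem.List.pyRange y columns 1)
      (fun i => PySem.List.pyGetD (PySem.List.pyGetD grid x []) i "")
  let count := count + pvBreakCount (PySem.List.pyRange y (-1) (-1))
      (fun i => PySem.List.pyGetD (PySem.List.pyGetD grid x []) i "")
  let count := count + pvBreakCount (PySem.List.pyRange x rows 1)
      (fun i => PySem.List.pyGetD (PySem.List.pyGetD grid i []) y "")
  let count := count + pvBreakCount (PySem.List.pyRange x (-1) (-1))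
      (fun i => PySem.List.pyGetD (PySem.List.pyGetD grid i []) y "")
  count

-- one marking loop of A: walk idxs, set CIBLE cells at (pos i), break at OBSTACLE (re-reading the cell
-- after the write, as the Python does)
def pvMarkLoop (idxs : List Int) (pos : Int → Int × Int) (g0 : List (List String)) :
    List (List String) :=
  (idxs.foldl (fun (s : List (List String) × Bool) i =>
      if s.2 then s
      else
        let r := (pos i).1
        let c := (pos i).2
        let g := if PySem.List.pyGetD (PySem.List.pyGetD s.1 r []) c "" = "CIBLE" then
                   PySem.List.pySetD s.1 r (PySem.List.pySetD (PySem.List.pyGetD s.1 r []) c "False")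
                 else s.1
        if PySem.List.pyGetD (PySem.List.pyGetD g r []) c "" = "OBSTACLE" then (g, true)
        else (g, false))
    (g0, false)).1

def place_guards (grid : List (List String)) : List (Int × Int) :=
  let guards : List (Int × Int) := []
  let rows : Int := PySem.List.len grid
  let columns : Int := PySem.List.len (PySem.List.pyGetD grid 0 [])
  let targets : List (Int × Int × Int) :=
    (PySem.List.pyRange 0 rows 1).foldl (fun ts x =>
      (PySem.List.pyRange 0 columns 1).foldl (fun ts y =>
        if PySem.List.pyGetD (PySem.List.pyGetD grid x []) y "" = "CIBLE" then
          ts ++ [(x, y, count_visible_targets grid x y)]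
        else ts) ts) []
  let targets := PySem.List.sorted targets (fun t => t.2.2) true
  let st :=
    targets.foldl (fun (s : List (Int × Int) × List (List String)) target =>
      let x := target.1
      let y := target.2.1
      if ¬ (s.1.any (fun guard => guard.1 == x || guard.2 == y)) then
        let guards := s.1 ++ [(x, y)]
        let g := pvMarkLoop (PySem.List.pyRange y columns 1) (fun i => (x, i)) s.2
        let g := pvMarkLoop (PySem.List.pyRange y (-1) (-1)) (fun i => (x, i)) g
        let g := pvMarkLoop (PySem.List.pyRange x rows 1) (fun i => (i, y)) g
        let g := pvMarkLoop (PySem.List.pyRange x (-1) (-1)) (fun i => (i, y)) g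
        (guards, g)
      else s)
    (guards, grid)
  st.1

-- ===== PORT B =====
-- B replaces the per-target scans by four directional sweep arrays, sorts by counting into
-- visibility buckets (a dict), and keeps used rows/columns in sets; it does not mutate the grid.
-- _sweep: loop with append = foldl carrying (out, acc); row[::-1] is List.reverse
def pvSweep (cells : List String) : List Int :=
  (cells.foldl (fun (s : List Int × Int) c =>
      let acc := if c = "OBSTACLE" then (0 : Int) else s.2 + (if c = "CIBLE" then 1 else 0)
      (s.1 ++ [acc], acc)) ([], 0)).1

def place_guards_alt (grid : List (List String)) : List (Int × Int) :=
  let rows : Int := PySem.List.len grid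
  let columns : Int := PySem.List.len (PySem.List.pyGetD grid 0 [])
  let trimmed := grid.map (fun row => PySem.List.slice row none (some columns))
  let left := trimmed.map (fun row => pvSweep row)
  let right := trimmed.map (fun row => (pvSweep row.reverse).reverse)
  let cols := (PySem.List.pyRange 0 columns 1).map (fun y => grid.map (fun row => PySem.List.pyGetD row y ""))
  let up := cols.map (fun col => pvSweep col)
  let down := cols.map (fun col => (pvSweep col.reverse).reverse)
  let maxvis : Int := rows + columns + 2
  let buckets : PySem.Dict Int (List (Int × Int)) :=
    (PySem.List.pyRange 0 rows 1).foldl (fun b x =>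
      (PySem.List.pyRange 0 columns 1).foldl (fun b y =>
        if PySem.List.pyGetD (PySem.List.pyGetD grid x []) y "" = "CIBLE" then
          let vis := PySem.List.pyGetD (PySem.List.pyGetD left x []) y 0
                   + PySem.List.pyGetD (PySem.List.pyGetD right x []) y 0
                   + PySem.List.pyGetD (PySem.List.pyGetD up y []) x 0
                   + PySem.List.pyGetD (PySem.List.pyGetD down y []) x 0
          b.insert vis (b.getD vis [] ++ [(x, y)])
        else b) b) PySem.Dict.empty
  let st :=
    (PySem.List.pyRange maxvis (-1) (-1)).foldl
      (fun (s : List (Int × Int) × PySem.Set Int × PySem.Set Int) v =>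
        (buckets.getD v []).foldl (fun s p =>
          if ¬ (PySem.Set.contains s.2.1 p.1) ∧ ¬ (PySem.Set.contains s.2.2 p.2) then
            (s.1 ++ [p], PySem.Set.add s.2.1 p.1, PySem.Set.add s.2.2 p.2)
          else s) s) ([], PySem.Set.empty, PySem.Set.empty)
  st.1

-- ===== PRECONDITION & SPEC =====
-- Pre_ is exactly A's domain: on [] A raises IndexError at grid[0]; on a grid with a row shorter
-- than row 0, the target-detection loop reads grid[x][y] for y < len(grid[0]) in every row and
-- raises IndexError.  Rows longer than row 0 are fine (their tails are never read).
def Pre_place_guards (grid : List (List String)) : Prop :=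
  grid ≠ [] ∧ ∀ r ∈ grid, (grid.headD []).length ≤ r.length
instance (grid : List (List String)) : Decidable (Pre_place_guards grid) := by
  unfold Pre_place_guards; infer_instance
def pvWitness_place_guards : List (List String) := [["CIBLE", "X"], ["X", "CIBLE"]]
def Spec_place_guards (grid : List (List String)) (out : List (Int × Int)) : Prop := out = place_guards_alt grid
instance (grid : List (List String)) (out : List (Int × Int)) : Decidable (Spec_place_guards grid out) := by unfold Spec_place_guards; infer_instance

-- ===== CLAIM (what is proved, stated in full; the proofs are below) =====
def Claim_equal_place_guards : Prop := ∀ (grid : List (List String)), Dom_place_guards grid → Pre_place_guards grid → Spec_place_guards grid (place_guards grid)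

-- ===== LEMMAS AND PROOFS =====

-- proof-only helpers: the step of a sweep, a structural sweep, and the count a break-scan computes
def pvStep (acc : Int) (c : String) : Int :=
  if c = "OBSTACLE" then 0 else acc + (if c = "CIBLE" then 1 else 0)

def pvScanCells : List String → Int
  | [] => 0
  | c :: cs => (if c = "CIBLE" then 1 else 0) + (if c = "OBSTACLE" then 0 else pvScanCells cs)

def pvSweepR : List String → Int → List Int
  | [], _ => []
  | c :: cs, acc => pvStep acc c :: pvSweepR cs (pvStep acc c)

lemma pvFoldFlag_absorb {σ : Type} (f : Int × Bool → σ → Int × Bool)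
    (h : ∀ c i, f (c, true) i = (c, true)) (I : List σ) (c : Int) :
    I.foldl f (c, true) = (c, true) := by
  induction I with
  | nil => rfl
  | cons i I ih => rw [List.foldl_cons, h]; exact ih

lemma pvFoldFlag_shift {σ : Type} (f : Int × Bool → σ → Int × Bool)
    (habs : ∀ c i, f (c, true) i = (c, true))
    (hstep : ∀ c i, f (c, false) i = (c + (f (0, false) i).1, (f (0, false) i).2))
    (I : List σ) (c : Int) :
    (I.foldl f (c, false)).1 = c + (I.foldl f (0, false)).1 := by
  induction I generalizing c with
  | nil => simp
  | cons i I ih =>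
    rw [List.foldl_cons, List.foldl_cons, hstep c i, hstep 0 i]
    rcases hfl : (f (0, false) i).2 with _ | _
    · simp only [zero_add]
      rw [ih, ih ((f (0, false) i).1)]
      ring
    · simp only [zero_add]
      rw [pvFoldFlag_absorb f habs, pvFoldFlag_absorb f habs]

lemma pvBreakCount_cons (get : Int → String) (i : Int) (I : List Int) :
    pvBreakCount (i :: I) get
      = (if get i = "CIBLE" then (1:Int) else 0)
        + (if get i = "OBSTACLE" then 0 else pvBreakCount I get) := by
  unfold pvBreakCount
  rw [List.foldl_cons]
  set f := fun (s : Int × Bool) (i : Int) =>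
      if s.2 = true then s
      else
        let cc := if get i = "CIBLE" then s.1 + 1 else s.1
        if get i = "OBSTACLE" then (cc, true) else (cc, false) with hf
  have habs : ∀ c j, f (c, true) j = (c, true) := by intro c j; simp [hf]
  have hstep : ∀ c j, f (c, false) j = (c + (f (0, false) j).1, (f (0, false) j).2) := by
    intro c j
    by_cases hobs : get j = "OBSTACLE" <;> by_cases hcib : get j = "CIBLE" <;>
      simp [hf, hobs, hcib] <;> ring
  show (List.foldl f (f (0, false) i) I).1 = _
  by_cases hobs : get i = "OBSTACLE"
  · have hcib : ¬ get i = "CIBLE" := by rw [hobs]; decide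
    have hinit : f (0, false) i = (0, true) := by simp [hf, hobs, hcib]
    rw [hinit, pvFoldFlag_absorb f habs]
    simp [hcib, hobs]
  · have hinit : f (0, false) i = ((if get i = "CIBLE" then (1:Int) else 0), false) := by
      by_cases hcib : get i = "CIBLE" <;> simp [hf, hobs, hcib]
    rw [hinit, pvFoldFlag_shift f habs hstep]
    simp [hobs]

lemma pvBreakCount_eq_scanCells (get : Int → String) (I : List Int) :
    pvBreakCount I get = pvScanCells (I.map get) := by
  induction I with
  | nil => rfl
  | cons i I ih => rw [pvBreakCount_cons, List.map_cons, pvScanCells, ih]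

lemma pvScanCells_nonneg (l : List String) : 0 ≤ pvScanCells l := by
  induction l with
  | nil => simp [pvScanCells]
  | cons c l ih => simp only [pvScanCells]; split_ifs <;> omega

lemma pvScanCells_le_length (l : List String) : pvScanCells l ≤ l.length := by
  induction l with
  | nil => simp [pvScanCells]
  | cons c l ih => simp only [pvScanCells, List.length_cons]; split_ifs <;> push_cast <;> omega

lemma pvScanCells_append_singleton (l : List String) (c : String) :
    pvScanCells (l ++ [c])
      = pvScanCells l + (if "OBSTACLE" ∈ l then 0 else if c = "CIBLE" then 1 else 0) := by
  induction l with
  | nil =>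
    simp only [List.nil_append, pvScanCells, List.not_mem_nil, ite_false]
    split_ifs <;> first | omega | simp_all
  | cons d l ih =>
    by_cases hd : d = "OBSTACLE"
    · subst hd
      simp [pvScanCells]
    · have hm : "OBSTACLE" ∈ d :: l ↔ "OBSTACLE" ∈ l := by
        simp [List.mem_cons, eq_comm, hd]
      simp only [List.cons_append, pvScanCells, hd, ite_false, ih]
      by_cases h : "OBSTACLE" ∈ l <;> simp [h, hm] <;> ring

lemma pvSweep_eq_sweepR_aux (cells : List String) (out : List Int) (acc : Int) :
    (cells.foldl (fun (s : List Int × Int) c =>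
      let a := if c = "OBSTACLE" then (0 : Int) else s.2 + (if c = "CIBLE" then 1 else 0)
      (s.1 ++ [a], a)) (out, acc)).1 = out ++ pvSweepR cells acc := by
  induction cells generalizing out acc with
  | nil => simp [pvSweepR]
  | cons c cs ih =>
    simp only [List.foldl_cons, pvSweepR]
    rw [ih]
    simp [pvStep]

lemma pvSweep_eq_sweepR (cells : List String) : pvSweep cells = pvSweepR cells 0 := by
  simpa using pvSweep_eq_sweepR_aux cells [] 0

lemma pvSweepR_length (cells : List String) (acc : Int) :
    (pvSweepR cells acc).length = cells.length := by
  induction cells generalizing acc with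
  | nil => rfl
  | cons c cs ih => simp [pvSweepR, ih]

lemma pvSweepR_getD (cells : List String) (acc : Int) (k : Nat) (hk : k < cells.length) :
    (pvSweepR cells acc).getD k 0
      = pvScanCells ((cells.take (k+1)).reverse)
        + (if "OBSTACLE" ∈ cells.take (k+1) then 0 else acc) := by
  induction cells generalizing acc k with
  | nil => simp at hk
  | cons c cs ih =>
    cases k with
    | zero =>
      simp only [pvSweepR, List.getD_cons_zero, List.take_succ_cons, List.take_zero,
        List.reverse_cons, List.reverse_nil, List.nil_append, pvScanCells, pvStep]
      by_cases hc : c = "OBSTACLE"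
      · have hnc : ¬ c = "CIBLE" := by rw [hc]; decide
        simp [hc, hnc]
      · have hm : ¬ ("OBSTACLE" ∈ [c]) := by simp [eq_comm, hc]
        simp only [hc, ite_false, if_neg hm]
        split_ifs <;> first | omega | simp_all
    | succ k =>
      have hk' : k < cs.length := by simpa using hk
      simp only [pvSweepR, List.getD_cons_succ, List.take_succ_cons]
      rw [ih _ k hk']
      rw [List.reverse_cons, pvScanCells_append_singleton]
      by_cases hm : "OBSTACLE" ∈ List.take (k+1) cs
      · by_cases hc : c = "OBSTACLE" <;>
          simp [hm, hc, List.mem_cons, pvStep]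
      · by_cases hc : c = "OBSTACLE"
        · have hnc : ¬ c = "CIBLE" := by rw [hc]; decide
          simp [hm, hc, hnc, List.mem_cons, pvStep]
        · have hmc : ¬ ("OBSTACLE" ∈ c :: List.take (k+1) cs) := by
            simp [List.mem_cons, eq_comm, hc, hm]
          simp only [pvStep, hc, ite_false, if_neg hmc, if_neg hm, List.mem_reverse,
            if_neg (by simpa using hm)]
          split_ifs <;> ring

lemma pvMap_pyRange_take {α : Type} (xs : List α) (d : α) (m : Int)
    (h0 : 0 ≤ m) (hm : m ≤ (xs.length : Int)) :
    (PySem.List.pyRange 0 m 1).map (fun j => PySem.List.pyGetD xs j d) = xs.take m.toNat := by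
  apply List.ext_getElem
  · simp [PySem.List.length_pyRange_one]; omega
  · intro k h1 h2
    have hk : k < m.toNat := by
      simpa [PySem.List.length_pyRange_one] using h1
    rw [List.getElem_map, PySem.List.getElem_pyRange_one, List.getElem_take]
    have : (0 : Int) + (k : Int) = ((k : Nat) : Int) := by omega
    rw [this, PySem.List.pyGetD_natCast, List.getD_eq_getElem]

lemma pvScanF (xs : List String) (y : Int) (h0 : 0 ≤ y) :
    pvBreakCount (PySem.List.pyRange y (PySem.List.len xs) 1) (fun i => PySem.List.pyGetD xs i "")
      = pvScanCells (xs.drop y.toNat) := by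
  rw [pvBreakCount_eq_scanCells, PySem.List.map_pyGetD_pyRange xs "" h0]

lemma pvScanB (xs : List String) (y : Int) (h0 : 0 ≤ y) (hy : y < (xs.length : Int)) :
    pvBreakCount (PySem.List.pyRange y (-1) (-1)) (fun i => PySem.List.pyGetD xs i "")
      = pvScanCells ((xs.take (y.toNat + 1)).reverse) := by
  rw [pvBreakCount_eq_scanCells, PySem.List.pyRange_neg_one_eq_reverse, List.map_reverse]
  rw [show (-1 : Int) + 1 = 0 by ring]
  rw [pvMap_pyRange_take xs "" (y + 1) (by omega) (by omega)]
  have : (y + 1).toNat = y.toNat + 1 := by omega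
  rw [this]

lemma pvSweep_getD_left (row : List String) (y : Int) (h0 : 0 ≤ y) (hy : y < (row.length : Int)) :
    PySem.List.pyGetD (pvSweep row) y 0 = pvScanCells ((row.take (y.toNat + 1)).reverse) := by
  rw [pvSweep_eq_sweepR, show y = ((y.toNat : Nat) : Int) by omega, PySem.List.pyGetD_natCast]
  rw [pvSweepR_getD row 0 y.toNat (by omega)]
  simp
  rw [show (max y 0).toNat = y.toNat from by omega]

lemma pvSweep_getD_right (row : List String) (y : Int) (h0 : 0 ≤ y) (hy : y < (row.length : Int)) :
    PySem.List.pyGetD ((pvSweep row.reverse).reverse) y 0 = pvScanCells (row.drop y.toNat) := by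
  rw [pvSweep_eq_sweepR, show y = ((y.toNat : Nat) : Int) by omega, PySem.List.pyGetD_natCast]
  have hlen : (pvSweepR row.reverse 0).length = row.length := by
    rw [pvSweepR_length, List.length_reverse]
  have hyl : y.toNat < row.length := by omega
  rw [List.getD_eq_getElem _ _ (by simp [hlen]; omega), List.getElem_reverse]
  have hk : row.length - 1 - y.toNat < row.reverse.length := by simp; omega
  rw [← List.getD_eq_getElem _ 0]
  · rw [hlen]
    rw [pvSweepR_getD row.reverse 0 (row.length - 1 - y.toNat) (by simpa using hk)]
    have h1 : row.length - 1 - y.toNat + 1 = row.length - y.toNat := by omega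
    rw [h1, List.take_reverse]
    have h2 : row.length - (row.length - y.toNat) = y.toNat := by omega
    rw [h2, List.reverse_reverse]
    simp
    rw [show (max y 0).toNat = y.toNat from by omega]

-- proof-only abbreviations for the row/column of a cell and B's visibility value
def pvRowOf (grid : List (List String)) (x : Int) : List String :=
  (PySem.List.pyGetD grid x []).take (grid.headD []).length
def pvColOf (grid : List (List String)) (y : Int) : List String :=
  grid.map (fun r => PySem.List.pyGetD r y "")
def pvVis (grid : List (List String)) (x y : Int) : Int :=
  PySem.List.pyGetD (pvSweep (pvRowOf grid x)) y 0
  + PySem.List.pyGetD ((pvSweep (pvRowOf grid x).reverse).reverse) y 0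
  + PySem.List.pyGetD (pvSweep (pvColOf grid y)) x 0
  + PySem.List.pyGetD ((pvSweep (pvColOf grid y).reverse).reverse) x 0

lemma pvGetD_nil_str (y : Int) : PySem.List.pyGetD ([] : List String) y "" = "" := by
  simp [PySem.List.pyGetD, PySem.List.pyGet?, PySem.List.pyIdx?]

lemma pvColGet (grid : List (List String)) (y i : Int) :
    PySem.List.pyGetD (PySem.List.pyGetD grid i []) y ""
      = PySem.List.pyGetD (pvColOf grid y) i "" := by
  unfold pvColOf
  have h := PySem.List.pyGetD_map (fun r => PySem.List.pyGetD r y "") grid i []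
  rw [pvGetD_nil_str] at h
  exact h.symm

lemma pvRowOf_len (grid : List (List String)) (x : Int)
    (hrect : ∀ r ∈ grid, (grid.headD []).length ≤ r.length)
    (hx0 : 0 ≤ x) (hx : x < (grid.length : Int)) :
    (pvRowOf grid x).length = (grid.headD []).length := by
  unfold pvRowOf
  rw [List.length_take]
  have hmem : PySem.List.pyGetD grid x [] ∈ grid := by
    rw [PySem.List.pyGetD_eq_getElem _ _ hx0 hx]
    exact List.getElem_mem _
  have h := hrect _ hmem
  omega

lemma pvRowOf_get (grid : List (List String)) (x i : Int)
    (hrect : ∀ r ∈ grid, (grid.headD []).length ≤ r.length)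
    (hx0 : 0 ≤ x) (hx : x < (grid.length : Int))
    (hi0 : 0 ≤ i) (hi : i < ((grid.headD []).length : Int)) :
    PySem.List.pyGetD (PySem.List.pyGetD grid x []) i ""
      = PySem.List.pyGetD (pvRowOf grid x) i "" := by
  have hmem : PySem.List.pyGetD grid x [] ∈ grid := by
    rw [PySem.List.pyGetD_eq_getElem _ _ hx0 hx]
    exact List.getElem_mem _
  have hw := hrect _ hmem
  have hlen : (pvRowOf grid x).length = (grid.headD []).length :=
    pvRowOf_len grid x hrect hx0 hx
  rw [PySem.List.pyGetD_eq_getElem _ _ hi0 (by omega),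
      PySem.List.pyGetD_eq_getElem _ _ hi0 (by rw [hlen]; exact hi)]
  unfold pvRowOf
  rw [List.getElem_take]

lemma pvCvt_eq (grid : List (List String)) (hne : grid ≠ [])
    (hrect : ∀ r ∈ grid, (grid.headD []).length ≤ r.length)
    (x y : Int) (hx0 : 0 ≤ x) (hx : x < (grid.length : Int))
    (hy0 : 0 ≤ y) (hy : y < ((grid.headD []).length : Int)) :
    count_visible_targets grid x y = pvVis grid x y := by
  obtain ⟨g0, gs, rfl⟩ : ∃ g0 gs, grid = g0 :: gs := by
    cases grid with
    | nil => exact absurd rfl hne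
    | cons a l => exact ⟨a, l, rfl⟩
  have hg0 : PySem.List.pyGetD (g0 :: gs) 0 [] = g0 := by
    simpa using PySem.List.pyGetD_natCast (g0 :: gs) 0 []
  have hhead : ((g0 :: gs).headD []) = g0 := rfl
  have hrowlen : (pvRowOf (g0 :: gs) x).length = g0.length := by
    simpa [hhead] using pvRowOf_len (g0 :: gs) x hrect hx0 hx
  have hcollen : (pvColOf (g0 :: gs) y).length = (g0 :: gs).length := by
    simp [pvColOf]
  simp only [count_visible_targets, hg0]
  -- replace the row reads (through the trimmed row) and the column reads
  have hrowpt : ∀ i : Int, 0 ≤ i → i < (g0.length : Int) →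
      PySem.List.pyGetD (PySem.List.pyGetD (g0 :: gs) x []) i ""
        = PySem.List.pyGetD (pvRowOf (g0 :: gs) x) i "" := by
    intro i h0 h1
    exact pvRowOf_get (g0 :: gs) x i hrect hx0 hx h0 (by simpa [hhead] using h1)
  have hr1 : pvBreakCount (PySem.List.pyRange y (PySem.List.len g0) 1)
        (fun i => PySem.List.pyGetD (PySem.List.pyGetD (g0 :: gs) x []) i "")
      = pvBreakCount (PySem.List.pyRange y (PySem.List.len g0) 1)
        (fun i => PySem.List.pyGetD (pvRowOf (g0 :: gs) x) i "") := by
    rw [pvBreakCount_eq_scanCells, pvBreakCount_eq_scanCells]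
    congr 1
    apply List.map_congr_left
    intro i hi
    have hb := PySem.List.mem_pyRange_one.mp hi
    have hlb : (PySem.List.len g0) = (g0.length : Int) := by simp [PySem.List.len_eq]
    exact hrowpt i (by omega) (by rw [← hlb]; exact hb.2)
  have hr2 : pvBreakCount (PySem.List.pyRange y (-1) (-1))
        (fun i => PySem.List.pyGetD (PySem.List.pyGetD (g0 :: gs) x []) i "")
      = pvBreakCount (PySem.List.pyRange y (-1) (-1))
        (fun i => PySem.List.pyGetD (pvRowOf (g0 :: gs) x) i "") := by
    rw [pvBreakCount_eq_scanCells, pvBreakCount_eq_scanCells]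
    congr 1
    apply List.map_congr_left
    intro i hi
    have hb := PySem.List.mem_pyRange_neg_one.mp hi
    have hyb : y < (g0.length : Int) := by simpa [hhead] using hy
    exact hrowpt i (by omega) (by omega)
  rw [hr1, hr2]
  have hcolfun : (fun i => PySem.List.pyGetD (PySem.List.pyGetD (g0 :: gs) i []) y "")
      = fun i => PySem.List.pyGetD (pvColOf (g0 :: gs) y) i "" := by
    funext i; exact pvColGet (g0 :: gs) y i
  rw [hcolfun]
  have hcolsInt : (PySem.List.len g0) = (PySem.List.len (pvRowOf (g0 :: gs) x)) := by
    simp [PySem.List.len_eq, hrowlen]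
  have hrowsInt : (PySem.List.len (g0 :: gs)) = (PySem.List.len (pvColOf (g0 :: gs) y)) := by
    simp [PySem.List.len_eq, hcollen]
  rw [hcolsInt, hrowsInt]
  rw [pvScanF _ y hy0, pvScanB _ y hy0 (by rw [hrowlen]; simpa [hhead] using hy),
      pvScanF _ x hx0, pvScanB _ x hx0 (by rw [hcollen]; simpa using hx)]
  unfold pvVis
  rw [pvSweep_getD_left _ y hy0 (by rw [hrowlen]; simpa [hhead] using hy),
      pvSweep_getD_right _ y hy0 (by rw [hrowlen]; simpa [hhead] using hy),
      pvSweep_getD_left _ x hx0 (by rw [hcollen]; simpa using hx),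
      pvSweep_getD_right _ x hx0 (by rw [hcollen]; simpa using hx)]
  ring

lemma pvVis_bounds (grid : List (List String)) (hne : grid ≠ [])
    (hrect : ∀ r ∈ grid, (grid.headD []).length ≤ r.length)
    (x y : Int) (hx0 : 0 ≤ x) (hx : x < (grid.length : Int))
    (hy0 : 0 ≤ y) (hy : y < ((grid.headD []).length : Int)) :
    0 ≤ pvVis grid x y ∧
      pvVis grid x y ≤ (grid.length : Int) + ((grid.headD []).length : Int) + 2 := by
  have hrowlen : (pvRowOf grid x).length = (grid.headD []).length :=
    pvRowOf_len grid x hrect hx0 hx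
  have hcollen : (pvColOf grid y).length = grid.length := by simp [pvColOf]
  unfold pvVis
  rw [pvSweep_getD_left _ y hy0 (by rw [hrowlen]; exact_mod_cast hy),
      pvSweep_getD_right _ y hy0 (by rw [hrowlen]; exact_mod_cast hy),
      pvSweep_getD_left _ x hx0 (by rw [hcollen]; exact_mod_cast hx),
      pvSweep_getD_right _ x hx0 (by rw [hcollen]; exact_mod_cast hx)]
  have b1 := pvScanCells_le_length (((pvRowOf grid x).take (y.toNat + 1)).reverse)
  have b2 := pvScanCells_le_length ((pvRowOf grid x).drop y.toNat)
  have b3 := pvScanCells_le_length (((pvColOf grid y).take (x.toNat + 1)).reverse)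
  have b4 := pvScanCells_le_length ((pvColOf grid y).drop x.toNat)
  have n1 := pvScanCells_nonneg (((pvRowOf grid x).take (y.toNat + 1)).reverse)
  have n2 := pvScanCells_nonneg ((pvRowOf grid x).drop y.toNat)
  have n3 := pvScanCells_nonneg (((pvColOf grid y).take (x.toNat + 1)).reverse)
  have n4 := pvScanCells_nonneg ((pvColOf grid y).drop x.toNat)
  simp only [List.length_reverse, List.length_take, List.length_drop, hrowlen, hcollen] at b1 b2 b3 b4
  constructor
  · omega
  · push_cast at b1 b2 b3 b4 ⊢
    omega

lemma pvAny_or {α : Type} (l : List α) (f g : α → Bool) :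
    l.any (fun x => f x || g x) = (l.any f || l.any g) := by
  rw [Bool.eq_iff_iff]
  simp [List.any_eq_true]
  constructor
  · rintro ⟨a, ha, h | h⟩
    · exact Or.inl ⟨a, ha, h⟩
    · exact Or.inr ⟨a, ha, h⟩
  · rintro (⟨a, ha, h⟩ | ⟨a, ha, h⟩)
    · exact ⟨a, ha, Or.inl h⟩
    · exact ⟨a, ha, Or.inr h⟩

lemma pvInsertBy_append_not {α : Type} (before : α → α → Bool) (x : α) (P S : List α)
    (h : ∀ p ∈ P, before x p = false) :
    PySem.List.insertBy before x (P ++ S) = P ++ PySem.List.insertBy before x S := by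
  induction P with
  | nil => rfl
  | cons p P ih =>
    have hp : before x p = false := h p (by simp)
    rcases S with _ | _ <;>
      · simp only [List.cons_append, PySem.List.insertBy, hp, Bool.false_eq_true, ite_false]
        rw [← List.cons_append]
        congr 1
        exact ih (fun q hq => h q (by simp [hq]))

lemma pvInsertBy_flatMap {α : Type} (key : α → Int) (x : α) (vs : List Int) (g : Int → List α)
    (hpw : vs.Pairwise (· > ·)) (hx : key x ∈ vs)
    (hg : ∀ v ∈ vs, ∀ t ∈ g v, key t = v) :
    PySem.List.insertBy (fun a b => decide (key b < key a)) x (vs.flatMap g)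
      = vs.flatMap (fun v => g v ++ if key x = v then [x] else []) := by
  induction vs with
  | nil => simp at hx
  | cons v vs ih =>
    obtain ⟨hv, hpw'⟩ := List.pairwise_cons.mp hpw
    rw [List.flatMap_cons, List.flatMap_cons]
    by_cases hxv : key x = v
    · have hnotin : key x ∉ vs := fun hmem => absurd (hv _ hmem) (by rw [hxv]; omega)
      have hskip : ∀ p ∈ g v, (fun a b => decide (key b < key a)) x p = false := by
        intro p hp
        have := hg v (by simp) p hp
        simp [this, hxv]
      rw [pvInsertBy_append_not _ _ _ _ hskip]
      have hsame : vs.flatMap (fun v => g v ++ if key x = v then [x] else []) = vs.flatMap g := by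
        apply List.flatMap_congr
        intro u hu
        have : ¬ key x = u := fun h => hnotin (h ▸ hu)
        simp [this]
      rw [hsame, if_pos hxv]
      have hfront : PySem.List.insertBy (fun a b => decide (key b < key a)) x (vs.flatMap g)
          = x :: vs.flatMap g := by
        cases hrest : vs.flatMap g with
        | nil => simp [PySem.List.insertBy]
        | cons yh yt =>
          have hyh : yh ∈ vs.flatMap g := by rw [hrest]; simp
          obtain ⟨u, hu, hyu⟩ := List.mem_flatMap.mp hyh
          have hky : key yh = u := hg u (by simp [hu]) yh hyu
          have : key yh < key x := by rw [hky, hxv]; exact hv u hu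
          simp [PySem.List.insertBy, this]
      rw [hfront]
      simp
    · have hxvs : key x ∈ vs := by
        rcases List.mem_cons.mp hx with h | h
        · exact absurd h hxv
        · exact h
      have hskip : ∀ p ∈ g v, (fun a b => decide (key b < key a)) x p = false := by
        intro p hp
        have hkp := hg v (by simp) p hp
        have : v > key x := hv _ hxvs
        simp [hkp]; omega
      rw [pvInsertBy_append_not _ _ _ _ hskip]
      rw [ih hpw' hxvs (fun u hu => hg u (by simp [hu]))]
      rw [if_neg hxv]
      simp

lemma pvSortedRev_eq_flatMap {α : Type} (key : α → Int) (ts : List α) (vs : List Int)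
    (hpw : vs.Pairwise (· > ·)) (hmem : ∀ t ∈ ts, key t ∈ vs) :
    PySem.List.sorted ts key true
      = vs.flatMap (fun v => ts.filter (fun t => decide (key t = v))) := by
  induction ts using List.reverseRecOn with
  | nil => simp [PySem.List.sorted_rev_eq_foldl_insertBy]
  | append_singleton l x ih =>
    rw [PySem.List.sorted_rev_eq_foldl_insertBy, List.foldl_append, List.foldl_cons, List.foldl_nil,
        ← PySem.List.sorted_rev_eq_foldl_insertBy]
    rw [ih (fun t ht => hmem t (by simp [ht]))]
    rw [pvInsertBy_flatMap key x vs _ hpw (hmem x (by simp))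
        (fun v _ t ht => by simpa using (List.mem_filter.mp ht).2)]
    apply List.flatMap_congr
    intro v _
    rw [List.filter_append]
    congr 1
    by_cases h : key x = v <;> simp [h]

lemma pvDict_getD_foldl (ps : List (Int × Int)) (k : Int × Int → Int) (v : Int) :
    (ps.foldl (fun b p => b.insert (k p) (b.getD (k p) [] ++ [p])) PySem.Dict.empty).getD v []
      = ps.filter (fun p => decide (k p = v)) := by
  induction ps using List.reverseRecOn with
  | nil => simp [PySem.Dict.getD, PySem.Dict.get?, PySem.Dict.empty]
  | append_singleton l p ih =>
    rw [List.foldl_append, List.foldl_cons, List.foldl_nil, PySem.Dict.getD_insert,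
        List.filter_append]
    by_cases h : k p = v
    · rw [if_pos h.symm, h, ih]
      simp [h]
    · rw [if_neg (fun hh => h hh.symm), ih]
      simp [h]

lemma pvSel (ps : List (Int × Int)) (gs : List (Int × Int)) (ur uc : PySem.Set Int)
    (hr : ∀ z : Int, PySem.Set.contains ur z = gs.any (fun gu => gu.1 == z))
    (hc : ∀ z : Int, PySem.Set.contains uc z = gs.any (fun gu => gu.2 == z)) :
    (ps.foldl (fun (s : List (Int × Int) × PySem.Set Int × PySem.Set Int) p =>
        if ¬ (PySem.Set.contains s.2.1 p.1) ∧ ¬ (PySem.Set.contains s.2.2 p.2) then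
          (s.1 ++ [p], PySem.Set.add s.2.1 p.1, PySem.Set.add s.2.2 p.2)
        else s) (gs, ur, uc)).1
      = ps.foldl (fun gs p =>
          if ¬ (gs.any (fun gu => gu.1 == p.1 || gu.2 == p.2)) then gs ++ [p] else gs) gs := by
  induction ps generalizing gs ur uc with
  | nil => rfl
  | cons p ps ih =>
    simp only [List.foldl_cons]
    have hcond : (¬ (PySem.Set.contains ur p.1) ∧ ¬ (PySem.Set.contains uc p.2))
        ↔ ¬ (gs.any (fun gu => gu.1 == p.1 || gu.2 == p.2) = true) := by
      rw [pvAny_or, hr p.1, hc p.2]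
      simp [not_or]
    by_cases hco : gs.any (fun gu => gu.1 == p.1 || gu.2 == p.2) = true
    · rw [if_neg (fun hand => (hcond.mp hand) hco), if_neg (not_not_intro hco)]
      exact ih gs ur uc hr hc
    · rw [if_pos (hcond.mpr hco), if_pos hco]
      apply ih
      · intro z
        rw [Bool.eq_iff_iff, PySem.Set.contains_iff, PySem.Set.mem_add,
            ← PySem.Set.contains_iff, hr z]
        simp only [List.any_append, List.any_cons, List.any_nil, Bool.or_false,
          Bool.or_eq_true, beq_iff_eq]
        constructor
        · rintro (h | h)
          exacts [Or.inl h, Or.inr h.symm]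
        · rintro (h | h)
          exacts [Or.inl h, Or.inr h.symm]
      · intro z
        rw [Bool.eq_iff_iff, PySem.Set.contains_iff, PySem.Set.mem_add,
            ← PySem.Set.contains_iff, hc z]
        simp only [List.any_append, List.any_cons, List.any_nil, Bool.or_false,
          Bool.or_eq_true, beq_iff_eq]
        constructor
        · rintro (h | h)
          exacts [Or.inl h, Or.inr h.symm]
        · rintro (h | h)
          exacts [Or.inl h, Or.inr h.symm]

lemma pvInner_targets {β : Type} (M : List Int) (P : Int → Prop) [DecidablePred P]
    (F : Int → β) (ts : List β) :
    M.foldl (fun ts y => if P y then ts ++ [F y] else ts) ts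
      = ts ++ (M.filter (fun y => decide (P y))).map F := by
  induction M generalizing ts with
  | nil => simp
  | cons y M ih => by_cases hy : P y <;> simp [hy, ih]

lemma pvNested_targets {β : Type} (L M : List Int) (P : Int → Int → Prop)
    [∀ x y, Decidable (P x y)] (F : Int → Int → β) (init : List β) :
    L.foldl (fun ts x => M.foldl (fun ts y => if P x y then ts ++ [F x y] else ts) ts) init
      = init ++ L.flatMap (fun x => (M.filter (fun y => decide (P x y))).map (F x)) := by
  induction L generalizing init with
  | nil => simp
  | cons x L ih => rw [List.foldl_cons, pvInner_targets, ih, List.flatMap_cons, List.append_assoc]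

lemma pvInner_buckets (M : List Int) (P : Int → Prop) [DecidablePred P] (x : Int)
    (V : Int → Int → Int) (b : PySem.Dict Int (List (Int × Int))) :
    M.foldl (fun b y => if P y then b.insert (V x y) (b.getD (V x y) [] ++ [(x, y)]) else b) b
      = ((M.filter (fun y => decide (P y))).map (fun y => (x, y))).foldl
          (fun b q => b.insert (V q.1 q.2) (b.getD (V q.1 q.2) [] ++ [q])) b := by
  induction M generalizing b with
  | nil => simp
  | cons y M ih => by_cases hy : P y <;> simp [hy, ih]

lemma pvNested_buckets (L M : List Int) (P : Int → Int → Prop) [∀ x y, Decidable (P x y)]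
    (V : Int → Int → Int) (b : PySem.Dict Int (List (Int × Int))) :
    L.foldl (fun b x =>
        M.foldl (fun b y => if P x y then b.insert (V x y) (b.getD (V x y) [] ++ [(x, y)]) else b) b) b
      = (L.flatMap (fun x => (M.filter (fun y => decide (P x y))).map (fun y => (x, y)))).foldl
          (fun b q => b.insert (V q.1 q.2) (b.getD (V q.1 q.2) [] ++ [q])) b := by
  induction L generalizing b with
  | nil => simp
  | cons x L ih =>
    rw [List.foldl_cons, pvInner_buckets, ih, List.flatMap_cons, List.foldl_append]

lemma pvProj (ts : List (Int × Int × Int)) (rows columns : Int)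
    (gs : List (Int × Int)) (g : List (List String)) :
    (ts.foldl (fun (s : List (Int × Int) × List (List String)) target =>
        if ¬ ((s.1.any fun guard => guard.1 == target.1 || guard.2 == target.2.1) = true) then
          (s.1 ++ [(target.1, target.2.1)],
            pvMarkLoop (PySem.List.pyRange target.1 (-1) (-1)) (fun i => (i, target.2.1))
              (pvMarkLoop (PySem.List.pyRange target.1 rows 1) (fun i => (i, target.2.1))
                (pvMarkLoop (PySem.List.pyRange target.2.1 (-1) (-1)) (fun i => (target.1, i))
                  (pvMarkLoop (PySem.List.pyRange target.2.1 columns 1) (fun i => (target.1, i)) s.2))))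
        else s) (gs, g)).1
      = ts.foldl (fun gs t =>
          if ¬ ((gs.any fun gu => gu.1 == t.1 || gu.2 == t.2.1) = true) then
            gs ++ [(t.1, t.2.1)]
          else gs) gs := by
  induction ts generalizing gs g with
  | nil => rfl
  | cons t ts ih =>
    simp only [List.foldl_cons]
    by_cases hco : (gs.any fun gu => gu.1 == t.1 || gu.2 == t.2.1) = true
    · rw [if_neg (not_not_intro hco), if_neg (not_not_intro hco)]
      exact ih gs g
    · rw [if_pos hco, if_pos hco]
      exact ih _ _

lemma pvHeadGet (grid : List (List String)) (hne : grid ≠ []) :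
    PySem.List.pyGetD grid 0 [] = grid.headD [] := by
  cases grid with
  | nil => exact absurd rfl hne
  | cons a l => simpa using PySem.List.pyGetD_natCast (a :: l) 0 []

lemma pvSliceRow (grid : List (List String)) (hne : grid ≠ []) (row : List String) :
    PySem.List.slice row none (some (PySem.List.len (PySem.List.pyGetD grid 0 []))) 
      = row.take (grid.headD []).length := by
  rw [PySem.List.slice_to row (by simp [PySem.List.len_eq])]
  congr 1
  rw [pvHeadGet grid hne]
  simp [PySem.List.len_eq]

lemma pvVisRaw_eq (grid : List (List String)) (hne : grid ≠ [])
    (hrect : ∀ r ∈ grid, (grid.headD []).length ≤ r.length)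
    (x y : Int) (hx0 : 0 ≤ x) (hx : x < (grid.length : Int))
    (hy0 : 0 ≤ y) (hy : y < ((grid.headD []).length : Int)) :
    PySem.List.pyGetD (PySem.List.pyGetD (List.map (fun row => pvSweep row)
        (List.map (fun row => PySem.List.slice row none
          (some (PySem.List.len (PySem.List.pyGetD grid 0 [])))) grid)) x []) y 0
    + PySem.List.pyGetD (PySem.List.pyGetD (List.map (fun row => (pvSweep row.reverse).reverse)
        (List.map (fun row => PySem.List.slice row none
          (some (PySem.List.len (PySem.List.pyGetD grid 0 [])))) grid)) x []) y 0
    + PySem.List.pyGetD (PySem.List.pyGetD (List.map (fun col => pvSweep col)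
        (List.map (fun y => List.map (fun row => PySem.List.pyGetD row y "") grid)
          (PySem.List.pyRange 0 (PySem.List.len (PySem.List.pyGetD grid 0 [])) 1))) y []) x 0
    + PySem.List.pyGetD (PySem.List.pyGetD (List.map (fun col => (pvSweep col.reverse).reverse)
        (List.map (fun y => List.map (fun row => PySem.List.pyGetD row y "") grid)
          (PySem.List.pyRange 0 (PySem.List.len (PySem.List.pyGetD grid 0 [])) 1))) y []) x 0
      = count_visible_targets grid x y := by
  have hC : PySem.List.len (PySem.List.pyGetD grid 0 []) = ((grid.headD []).length : Int) := by
    rw [pvHeadGet grid hne]; simp [PySem.List.len_eq]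
  have h1 : PySem.List.pyGetD (List.map (fun row => pvSweep row)
      (List.map (fun row => PySem.List.slice row none
        (some (PySem.List.len (PySem.List.pyGetD grid 0 [])))) grid)) x []
      = pvSweep (pvRowOf grid x) := by
    rw [List.map_map]
    have := PySem.List.pyGetD_map
      ((fun row => pvSweep row) ∘ (fun row => PySem.List.slice row none
        (some (PySem.List.len (PySem.List.pyGetD grid 0 []))))) grid x []
    simp only [Function.comp] at this
    rw [show pvSweep (PySem.List.slice [] none
        (some (PySem.List.len (PySem.List.pyGetD grid 0 [])))) = ([] : List Int) from by
      rw [PySem.List.slice_to _ (by simp [PySem.List.len_eq])]; simp [pvSweep]] at this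
    rw [this, pvSliceRow grid hne]
    rfl
  have h2 : PySem.List.pyGetD (List.map (fun row => (pvSweep row.reverse).reverse)
      (List.map (fun row => PySem.List.slice row none
        (some (PySem.List.len (PySem.List.pyGetD grid 0 [])))) grid)) x []
      = (pvSweep (pvRowOf grid x).reverse).reverse := by
    rw [List.map_map]
    have := PySem.List.pyGetD_map
      ((fun row => (pvSweep row.reverse).reverse) ∘ (fun row => PySem.List.slice row none
        (some (PySem.List.len (PySem.List.pyGetD grid 0 []))))) grid x []
    simp only [Function.comp] at this
    rw [show (pvSweep (PySem.List.slice ([] : List String) none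
        (some (PySem.List.len (PySem.List.pyGetD grid 0 [])))).reverse).reverse
        = ([] : List Int) from by
      rw [PySem.List.slice_to _ (by simp [PySem.List.len_eq])]; simp [pvSweep]] at this
    rw [this, pvSliceRow grid hne]
    rfl
  have hcols : PySem.List.pyGetD
      (List.map (fun y => List.map (fun row => PySem.List.pyGetD row y "") grid)
        (PySem.List.pyRange 0 (PySem.List.len (PySem.List.pyGetD grid 0 [])) 1)) y []
      = pvColOf grid y := by
    rw [hC]
    exact PySem.List.pyGetD_map_pyRange_of_nonneg _ _ y [] hy0 hy
  have h3 : PySem.List.pyGetD (List.map (fun col => pvSweep col)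
      (List.map (fun y => List.map (fun row => PySem.List.pyGetD row y "") grid)
        (PySem.List.pyRange 0 (PySem.List.len (PySem.List.pyGetD grid 0 [])) 1))) y []
      = pvSweep (pvColOf grid y) := by
    have := PySem.List.pyGetD_map (fun col => pvSweep col)
      (List.map (fun y => List.map (fun row => PySem.List.pyGetD row y "") grid)
        (PySem.List.pyRange 0 (PySem.List.len (PySem.List.pyGetD grid 0 [])) 1)) y []
    rw [hcols] at this
    simpa using this
  have h4 : PySem.List.pyGetD (List.map (fun col => (pvSweep col.reverse).reverse)
      (List.map (fun y => List.map (fun row => PySem.List.pyGetD row y "") grid)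
        (PySem.List.pyRange 0 (PySem.List.len (PySem.List.pyGetD grid 0 [])) 1))) y []
      = (pvSweep (pvColOf grid y).reverse).reverse := by
    have := PySem.List.pyGetD_map (fun col => (pvSweep col.reverse).reverse)
      (List.map (fun y => List.map (fun row => PySem.List.pyGetD row y "") grid)
        (PySem.List.pyRange 0 (PySem.List.len (PySem.List.pyGetD grid 0 [])) 1)) y []
    rw [hcols] at this
    simpa using this
  rw [h1, h2, h3, h4]
  rw [pvCvt_eq grid hne hrect x y hx0 hx hy0 hy]
  unfold pvVis
  ring

-- ===== VERDICT =====
theorem place_guards_spec : Claim_equal_place_guards := by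
  intro grid _ hpre
  obtain ⟨hne, hrect⟩ := hpre
  unfold Spec_place_guards
  have hlen : PySem.List.len grid = (grid.length : Int) := by simp [PySem.List.len_eq]
  have hC : PySem.List.len (PySem.List.pyGetD grid 0 []) = ((grid.headD []).length : Int) := by
    rw [pvHeadGet grid hne]; simp [PySem.List.len_eq]
  -- the common list of target cells, row-major
  set cib : List (Int × Int) :=
    (PySem.List.pyRange 0 (PySem.List.len grid) 1).flatMap
      (fun x => ((PySem.List.pyRange 0 (PySem.List.len (PySem.List.pyGetD grid 0 [])) 1).filter
          (fun y => decide (PySem.List.pyGetD (PySem.List.pyGetD grid x []) y "" = "CIBLE"))).map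
        (fun y => (x, y))) with hcib
  have hqb : ∀ q ∈ cib, 0 ≤ q.1 ∧ q.1 < (grid.length : Int)
      ∧ 0 ≤ q.2 ∧ q.2 < ((grid.headD []).length : Int) := by
    intro q hq
    rw [hcib] at hq
    obtain ⟨x, hx, hq2⟩ := List.mem_flatMap.mp hq
    obtain ⟨y, hy, rfl⟩ := List.mem_map.mp hq2
    have hx' := PySem.List.mem_pyRange_one.mp hx
    have hy' := PySem.List.mem_pyRange_one.mp (List.mem_filter.mp hy).1
    rw [hlen] at hx'
    rw [hC] at hy'
    exact ⟨hx'.1, hx'.2, hy'.1, hy'.2⟩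
  have hvs_pw : (PySem.List.pyRange
      (PySem.List.len grid + PySem.List.len (PySem.List.pyGetD grid 0 []) + 2) (-1) (-1)).Pairwise
      (· > ·) := by
    rw [PySem.List.pyRange_neg_one_eq_reverse, List.pairwise_reverse]
    exact PySem.List.pairwise_lt_pyRange_one _ _
  have hkeys : ∀ t ∈ cib.map (fun q => (q.1, q.2, count_visible_targets grid q.1 q.2)),
      (fun t => t.2.2) t ∈ PySem.List.pyRange
        (PySem.List.len grid + PySem.List.len (PySem.List.pyGetD grid 0 []) + 2) (-1) (-1) := by
    intro t ht
    obtain ⟨q, hq, rfl⟩ := List.mem_map.mp ht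
    obtain ⟨h1, h2, h3, h4⟩ := hqb q hq
    have hb := pvVis_bounds grid hne hrect q.1 q.2 h1 h2 h3 h4
    rw [← pvCvt_eq grid hne hrect q.1 q.2 h1 h2 h3 h4] at hb
    rw [PySem.List.mem_pyRange_neg_one, hlen, hC]
    dsimp only
    omega
  -- A side
  simp only [place_guards]
  rw [pvProj]
  rw [pvNested_targets (PySem.List.pyRange 0 (PySem.List.len grid) 1)
      (PySem.List.pyRange 0 (PySem.List.len (PySem.List.pyGetD grid 0 [])) 1)
      (fun x y => PySem.List.pyGetD (PySem.List.pyGetD grid x []) y "" = "CIBLE")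
      (fun x y => (x, y, count_visible_targets grid x y)) []]
  rw [List.nil_append]
  have htri : (PySem.List.pyRange 0 (PySem.List.len grid) 1).flatMap
      (fun x => ((PySem.List.pyRange 0 (PySem.List.len (PySem.List.pyGetD grid 0 [])) 1).filter
          (fun y => decide (PySem.List.pyGetD (PySem.List.pyGetD grid x []) y "" = "CIBLE"))).map
        ((fun x y => (x, y, count_visible_targets grid x y)) x))
      = cib.map (fun q => (q.1, q.2, count_visible_targets grid q.1 q.2)) := by
    rw [hcib, List.map_flatMap]
    exact List.flatMap_congr (fun x _ => by rw [List.map_map]; rfl)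
  rw [htri]
  rw [pvSortedRev_eq_flatMap (α := Int × Int × Int) (fun t => t.2.2)
      (cib.map (fun q => (q.1, q.2, count_visible_targets grid q.1 q.2)))
      (PySem.List.pyRange
        (PySem.List.len grid + PySem.List.len (PySem.List.pyGetD grid 0 []) + 2) (-1) (-1))
      hvs_pw hkeys]
  have hfm : (PySem.List.pyRange
        (PySem.List.len grid + PySem.List.len (PySem.List.pyGetD grid 0 []) + 2) (-1) (-1)).flatMap
      (fun v => (cib.map (fun q => (q.1, q.2, count_visible_targets grid q.1 q.2))).filter
        (fun t => decide (t.2.2 = v)))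
      = ((PySem.List.pyRange
          (PySem.List.len grid + PySem.List.len (PySem.List.pyGetD grid 0 []) + 2) (-1) (-1)).flatMap
        (fun v => cib.filter (fun q => decide (count_visible_targets grid q.1 q.2 = v)))).map
          (fun q => (q.1, q.2, count_visible_targets grid q.1 q.2)) := by
    have step1 : ∀ v : Int, ((cib.map (fun q => (q.1, q.2, count_visible_targets grid q.1 q.2))).filter
        (fun t => decide (t.2.2 = v)))
        = (cib.filter (fun q => decide (count_visible_targets grid q.1 q.2 = v))).map
            (fun q => (q.1, q.2, count_visible_targets grid q.1 q.2)) := by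
      intro v
      exact List.filter_map
    exact Eq.trans (List.flatMap_congr (fun v _ => step1 v)) (List.map_flatMap).symm
  rw [hfm, List.foldl_map]
  -- B side
  simp only [place_guards_alt]
  rw [← List.foldl_flatMap]
  rw [pvNested_buckets (PySem.List.pyRange 0 (PySem.List.len grid) 1)
      (PySem.List.pyRange 0 (PySem.List.len (PySem.List.pyGetD grid 0 [])) 1)
      (fun x y => PySem.List.pyGetD (PySem.List.pyGetD grid x []) y "" = "CIBLE")
      (fun x y =>
        PySem.List.pyGetD (PySem.List.pyGetD (List.map (fun row => pvSweep row)
            (List.map (fun row => PySem.List.slice row none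
              (some (PySem.List.len (PySem.List.pyGetD grid 0 [])))) grid)) x []) y 0
        + PySem.List.pyGetD (PySem.List.pyGetD (List.map (fun row => (pvSweep row.reverse).reverse)
            (List.map (fun row => PySem.List.slice row none
              (some (PySem.List.len (PySem.List.pyGetD grid 0 [])))) grid)) x []) y 0
        + PySem.List.pyGetD (PySem.List.pyGetD (List.map (fun col => pvSweep col)
            (List.map (fun y => List.map (fun row => PySem.List.pyGetD row y "") grid)
              (PySem.List.pyRange 0 (PySem.List.len (PySem.List.pyGetD grid 0 [])) 1))) y []) x 0
        + PySem.List.pyGetD (PySem.List.pyGetD (List.map (fun col => (pvSweep col.reverse).reverse)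
            (List.map (fun y => List.map (fun row => PySem.List.pyGetD row y "") grid)
              (PySem.List.pyRange 0 (PySem.List.len (PySem.List.pyGetD grid 0 [])) 1))) y []) x 0)
      PySem.Dict.empty]
  have hbk : (PySem.List.pyRange
        (PySem.List.len grid + PySem.List.len (PySem.List.pyGetD grid 0 []) + 2) (-1) (-1)).flatMap
      (fun v => (cib.foldl (fun b q => b.insert
          ((fun x y =>
            PySem.List.pyGetD (PySem.List.pyGetD (List.map (fun row => pvSweep row)
                (List.map (fun row => PySem.List.slice row none
                  (some (PySem.List.len (PySem.List.pyGetD grid 0 [])))) grid)) x []) y 0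
            + PySem.List.pyGetD (PySem.List.pyGetD (List.map (fun row => (pvSweep row.reverse).reverse)
                (List.map (fun row => PySem.List.slice row none
                  (some (PySem.List.len (PySem.List.pyGetD grid 0 [])))) grid)) x []) y 0
            + PySem.List.pyGetD (PySem.List.pyGetD (List.map (fun col => pvSweep col)
                (List.map (fun y => List.map (fun row => PySem.List.pyGetD row y "") grid)
                  (PySem.List.pyRange 0 (PySem.List.len (PySem.List.pyGetD grid 0 [])) 1))) y []) x 0
            + PySem.List.pyGetD (PySem.List.pyGetD (List.map (fun col => (pvSweep col.reverse).reverse)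
                (List.map (fun y => List.map (fun row => PySem.List.pyGetD row y "") grid)
                  (PySem.List.pyRange 0 (PySem.List.len (PySem.List.pyGetD grid 0 [])) 1))) y []) x 0) q.1 q.2)
          (b.getD ((fun x y =>
            PySem.List.pyGetD (PySem.List.pyGetD (List.map (fun row => pvSweep row)
                (List.map (fun row => PySem.List.slice row none
                  (some (PySem.List.len (PySem.List.pyGetD grid 0 [])))) grid)) x []) y 0
            + PySem.List.pyGetD (PySem.List.pyGetD (List.map (fun row => (pvSweep row.reverse).reverse)
                (List.map (fun row => PySem.List.slice row none
                  (some (PySem.List.len (PySem.List.pyGetD grid 0 [])))) grid)) x []) y 0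
            + PySem.List.pyGetD (PySem.List.pyGetD (List.map (fun col => pvSweep col)
                (List.map (fun y => List.map (fun row => PySem.List.pyGetD row y "") grid)
                  (PySem.List.pyRange 0 (PySem.List.len (PySem.List.pyGetD grid 0 [])) 1))) y []) x 0
            + PySem.List.pyGetD (PySem.List.pyGetD (List.map (fun col => (pvSweep col.reverse).reverse)
                (List.map (fun y => List.map (fun row => PySem.List.pyGetD row y "") grid)
                  (PySem.List.pyRange 0 (PySem.List.len (PySem.List.pyGetD grid 0 [])) 1))) y []) x 0) q.1 q.2)
            [] ++ [q])) PySem.Dict.empty).getD v [])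
      = (PySem.List.pyRange
          (PySem.List.len grid + PySem.List.len (PySem.List.pyGetD grid 0 []) + 2) (-1) (-1)).flatMap
        (fun v => cib.filter (fun q => decide (count_visible_targets grid q.1 q.2 = v))) := by
    apply List.flatMap_congr
    intro v _
    rw [pvDict_getD_foldl]
    apply List.filter_congr
    intro q hq
    obtain ⟨h1, h2, h3, h4⟩ := hqb q hq
    simp only [pvVisRaw_eq grid hne hrect q.1 q.2 h1 h2 h3 h4]
  rw [hbk]
  rw [pvSel _ [] PySem.Set.empty PySem.Set.empty (fun z => rfl) (fun z => rfl)]
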